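-- pv_equiv track=rewrite | github.com/khm1102/BOJ | 백준/Gold/1756. 피자 굽기/피자 굽기.py | solve
-- ===== SOURCE A (Python) =====
-- def solve(D, N, oven, pizza_diameters):
--     for i in range(1, D):
--         oven[i] = min(oven[i], oven[i-1])
--
--     depth = D
--     for pizza in pizza_diameters:
--         while depth > 0 and oven[depth-1] < pizza:
--             depth -= 1
--         if depth == 0:
--             return 0
--         depth -= 1
--
--     return depth + 1
-- ===== SOURCE B (Python) =====
-- def solve(D, N, oven, pizza_diameters):
--     # prefix-min oven built functionally; per pizza a binary search counts slots
--     # deep enough, instead of A's linear pointer walk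
--     ov = []
--     for x in oven[:D]:
--         ov.append(x if not ov or x < ov[-1] else ov[-1])
--     depth = D
--     for pizza in pizza_diameters:
--         lo, hi = 0, len(ov)
--         while lo < hi:
--             mid = (lo + hi) // 2
--             if ov[mid] >= pizza:
--                 lo = mid + 1
--             else:
--                 hi = mid
--         depth = min(depth, lo)
--         if depth == 0:
--             return 0
--         depth -= 1
--     return depth + 1
-- ===== Notes on version B (the rewrite author's own statement) =====
-- stated objective: alternative
-- what changed: B builds the prefix-min oven functionally by appending running minima (instead of A's in-place index mutation) and replaces A's amortized linear pointer walk per pizza by a binary search over the monotone oven counting slots deep enough, clamped with min(depth, count).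
import Mathlib
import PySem

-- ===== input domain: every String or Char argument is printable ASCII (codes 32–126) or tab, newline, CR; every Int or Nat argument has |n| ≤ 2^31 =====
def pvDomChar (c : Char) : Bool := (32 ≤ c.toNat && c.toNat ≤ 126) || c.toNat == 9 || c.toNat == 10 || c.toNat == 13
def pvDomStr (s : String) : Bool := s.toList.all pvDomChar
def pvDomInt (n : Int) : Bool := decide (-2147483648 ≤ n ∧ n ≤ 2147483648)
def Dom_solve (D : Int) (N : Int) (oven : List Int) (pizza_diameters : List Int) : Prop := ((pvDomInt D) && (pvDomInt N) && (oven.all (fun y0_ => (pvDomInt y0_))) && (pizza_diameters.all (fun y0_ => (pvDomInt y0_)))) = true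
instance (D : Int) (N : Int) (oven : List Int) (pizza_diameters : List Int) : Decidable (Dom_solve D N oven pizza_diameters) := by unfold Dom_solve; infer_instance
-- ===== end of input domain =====

-- B replaces A's in-place prefix-min mutation and amortized pointer walk by a functional
-- prefix-min build plus a binary search per pizza (alternative decomposition, same results).
-- A mutates `oven` in place in Python; the equivalence proved here is about the return value only.

-- ===== PORT A =====
-- oven[i] = min(oven[i], oven[i-1]); i comes from range(1,D) so i ≥ 1 (no negative wrap);
-- out-of-range (an IndexError in Python) is excluded by Pre_solve, the guard only keeps the port total.
def pvStepA (ov : List Int) (i : Int) : List Int :=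
  match PySem.List.pyGet? ov i, PySem.List.pyGet? ov (i - 1) with
  | some a, some b => ov.set i.toNat (min a b)
  | _, _ => ov

-- while depth > 0 and oven[depth-1] < pizza: depth -= 1   (oven[depth-1] in range under Pre_solve)
def pvWhileA (ov : List Int) (p : Int) (d : Int) : Int :=
  if 0 < d ∧ PySem.List.pyGetD ov (d - 1) 0 < p then pvWhileA ov p (d - 1) else d
termination_by d.toNat
decreasing_by omega

def pvLoopA (ov : List Int) : List Int → Int → Int
  | [], d => d + 1
  | p :: ps, d =>
    let d' := pvWhileA ov p d
    if d' = 0 then 0 else pvLoopA ov ps (d' - 1)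

def solve (D : Int) (N : Int) (oven : List Int) (pizza_diameters : List Int) : Int :=
  pvLoopA ((PySem.List.pyRange 1 D 1).foldl pvStepA oven) pizza_diameters D

-- ===== PORT B =====
-- ov.append(x if not ov or x < ov[-1] else ov[-1])
def pvBuildB (ov : List Int) (x : Int) : List Int :=
  match ov.getLast? with
  | none => ov ++ [x]
  | some m => ov ++ [if x < m then x else m]

-- binary search: while lo < hi: mid = (lo+hi)//2; if ov[mid] >= pizza: lo = mid+1 else hi = mid
-- (ov[mid] is always in range at B's call sites; pyGetD keeps the port total)
def pvBS (ov : List Int) (p : Int) (lo hi : Int) : Int :=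
  if hlt : lo < hi then
    let mid := PySem.Int.floordiv (lo + hi) 2
    if p ≤ PySem.List.pyGetD ov mid 0 then pvBS ov p (mid + 1) hi else pvBS ov p lo mid
  else lo
termination_by (hi - lo).toNat
decreasing_by
  all_goals
    have hb := PySem.Int.floordiv_two_mid_bounds (le_of_lt hlt)
    have h2 := (PySem.Int.le_floordiv_iff_mul_le (a := lo + hi) (b := 2)
      (q := PySem.Int.floordiv (lo + hi) 2) (by omega)).mp (le_refl _)
    omega

def pvLoopB (ov : List Int) : List Int → Int → Int
  | [], d => d + 1
  | p :: ps, d =>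
    let t := pvBS ov p 0 ov.length
    let d' := min d t
    if d' = 0 then 0 else pvLoopB ov ps (d' - 1)

def solve_alt (D : Int) (N : Int) (oven : List Int) (pizza_diameters : List Int) : Int :=
  pvLoopB ((PySem.List.slice oven none (some D)).foldl pvBuildB []) pizza_diameters D

-- ===== PRECONDITION & SPEC =====
-- A raises IndexError exactly when it indexes past the oven: Pre_ admits every input where A
-- returns (D within the oven, or D ≤ 0, or D = 1 with no pizzas so no slot is ever read).
def Pre_solve (D : Int) (N : Int) (oven : List Int) (pizza_diameters : List Int) : Prop :=
  D ≤ oven.length ∨ D ≤ 0 ∨ (D = 1 ∧ pizza_diameters = [])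
instance (D : Int) (N : Int) (oven : List Int) (pizza_diameters : List Int) : Decidable (Pre_solve D N oven pizza_diameters) := by unfold Pre_solve; infer_instance

def pvWitness_solve : Int × Int × List Int × List Int := (3, 2, [7, 5, 6], [4, 6])

def Spec_solve (D : Int) (N : Int) (oven : List Int) (pizza_diameters : List Int) (out : Int) : Prop := out = solve_alt D N oven pizza_diameters
instance (D : Int) (N : Int) (oven : List Int) (pizza_diameters : List Int) (out : Int) : Decidable (Spec_solve D N oven pizza_diameters out) := by unfold Spec_solve; infer_instance

-- ===== CLAIM (what is proved, stated in full; the proofs are below) =====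
def Claim_equal_solve : Prop := ∀ (D : Int) (N : Int) (oven : List Int) (pizza_diameters : List Int), Dom_solve D N oven pizza_diameters → Pre_solve D N oven pizza_diameters → Spec_solve D N oven pizza_diameters (solve D N oven pizza_diameters)

-- ===== LEMMAS AND PROOFS =====

-- running prefix minima of a list, continuing from accumulated minimum m
def pmAux (m : Int) : List Int → List Int
  | [] => []
  | x :: xs => min m x :: pmAux (min m x) xs

-- non-increasing list, stated on indices
def NonInc (l : List Int) : Prop :=
  ∀ (i j : Nat) (hi : i < l.length) (hj : j < l.length), i ≤ j → l[j] ≤ l[i]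

-- number of leading elements ≥ p
def thN (p : Int) : List Int → Nat
  | [] => 0
  | x :: xs => if p ≤ x then thN p xs + 1 else 0

theorem pmAux_length (m : Int) (xs : List Int) : (pmAux m xs).length = xs.length := by
  induction xs generalizing m with
  | nil => rfl
  | cons x xs ih => simp [pmAux, ih]

theorem thN_le_length (p : Int) (xs : List Int) : thN p xs ≤ xs.length := by
  induction xs with
  | nil => simp [thN]
  | cons x xs ih => simp only [thN]; split <;> simp <;> omega

theorem nonInc_tail {x : Int} {xs : List Int} (h : NonInc (x :: xs)) : NonInc xs := by
  intro i j hi hj hij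
  have := h (i + 1) (j + 1) (by simpa using hi) (by simpa using hj) (by omega)
  simpa using this

theorem nonInc_cons {a : Int} {L : List Int} (h : NonInc L)
    (ha : ∀ (h0 : 0 < L.length), L[0] ≤ a) : NonInc (a :: L) := by
  intro i j hi hj hij
  match i, j with
  | 0, 0 => simp
  | 0, Nat.succ k =>
    have hk : k < L.length := by simpa using hj
    have h1 : L[k] ≤ L[0] := h 0 k (by omega) hk (by omega)
    have h2 := ha (by omega)
    simpa using le_trans h1 h2
  | Nat.succ i', Nat.succ j' =>
    have := h i' j' (by simpa using hi) (by simpa using hj) (by omega)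
    simpa using this

theorem nonInc_pmAux (m : Int) (xs : List Int) : NonInc (m :: pmAux m xs) := by
  induction xs generalizing m with
  | nil =>
    intro i j hi hj hij
    simp [pmAux] at hi hj
    subst hi; subst hj; simp
  | cons x xs ih =>
    have hL := ih (min m x)
    refine nonInc_cons hL ?_
    intro h0
    simp [pmAux]

-- indices below thN carry values ≥ p
theorem thN_lt_imp (p : Int) (xs : List Int) (i : Nat) (hlen : i < xs.length)
    (hi : i < thN p xs) : p ≤ xs[i] := by
  induction xs generalizing i with
  | nil => simp [thN] at hi
  | cons x xs ih =>
    simp only [thN] at hi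
    split at hi
    · match i with
      | 0 => simpa using ‹p ≤ x›
      | Nat.succ k => simpa using ih k (by simpa using hlen) (by omega)
    · omega

-- indices at or above thN carry values < p (needs the list non-increasing)
theorem thN_ge_imp (p : Int) (xs : List Int) (hni : NonInc xs) (i : Nat)
    (hth : thN p xs ≤ i) (hlen : i < xs.length) : xs[i] < p := by
  match xs, hlen with
  | x :: xs, hlen =>
    simp only [thN] at hth
    split at hth
    · -- p ≤ x : recurse on tail
      match i with
      | 0 => omega
      | Nat.succ k =>
        have := thN_ge_imp p xs (nonInc_tail hni) k (by omega) (by simpa using hlen)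
        simpa using this
    · -- x < p : every element ≤ head = x < p
      have hx : ¬ p ≤ x := by assumption
      have := hni 0 i (by omega) hlen (by omega)
      simp at this
      omega

-- value at a prefix index is unchanged by appending a tail
theorem pyGetD_append_left (l1 l2 : List Int) (i : Int) (h0 : 0 ≤ i) (hi : i < (l1.length : Int)) :
    PySem.List.pyGetD (l1 ++ l2) i 0 = PySem.List.pyGetD l1 i 0 := by
  rw [PySem.List.pyGetD_eq_getElem (l1 ++ l2) 0 h0 (by simp; omega),
      PySem.List.pyGetD_eq_getElem l1 0 h0 (by omega)]
  exact List.getElem_append_left (by omega)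

-- A's while loop realises min d (thN p pm) when pm is the non-increasing prefix A reads
theorem whileA_eq_min (pm tail : List Int) (p : Int) (hni : NonInc pm) :
    ∀ d : Int, d ≤ (pm.length : Int) → pvWhileA (pm ++ tail) p d = min d (thN p pm) := by
  intro d
  induction hd : d.toNat using Nat.strong_induction_on generalizing d with
  | _ n ih =>
  intro hdlen
  subst hd
  rw [pvWhileA]
  by_cases hpos : 0 < d
  · have hidx : (d - 1).toNat < pm.length := by omega
    have hget : PySem.List.pyGetD (pm ++ tail) (d - 1) 0 = pm[(d - 1).toNat] := by
      rw [pyGetD_append_left pm tail (d - 1) (by omega) (by omega)]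
      exact PySem.List.pyGetD_eq_getElem pm 0 (by omega) (by omega)
    by_cases hlt : PySem.List.pyGetD (pm ++ tail) (d - 1) 0 < p
    · have hth : (thN p pm : Int) ≤ d - 1 := by
        by_contra hc
        have := thN_lt_imp p pm (d - 1).toNat hidx (by omega)
        rw [hget] at hlt; omega
      rw [if_pos ⟨hpos, hlt⟩]
      rw [ih (d - 1).toNat (by omega) (d - 1) rfl (by omega)]
      omega
    · have hth : d - 1 < (thN p pm : Int) := by
        by_contra hc
        have := thN_ge_imp p pm hni (d - 1).toNat (by omega) hidx
        rw [hget] at hlt; omega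
      rw [if_neg (by tauto)]
      omega
  · rw [if_neg (by tauto)]
    have : (0 : Int) ≤ (thN p pm : Int) := by positivity
    omega

-- B's binary search converges to thN when the search bracket contains it
theorem bs_eq_thN (ov : List Int) (p : Int) (hni : NonInc ov) :
    ∀ (lo hi : Int), 0 ≤ lo → lo ≤ (thN p ov : Int) → (thN p ov : Int) ≤ hi →
      hi ≤ (ov.length : Int) → pvBS ov p lo hi = (thN p ov : Int) := by
  intro lo hi
  induction hgas : (hi - lo).toNat using Nat.strong_induction_on generalizing lo hi with
  | _ n ih =>
  intro h0 hlo hhi hlen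
  subst hgas
  rw [pvBS]
  by_cases hlt : lo < hi
  · rw [dif_pos hlt]
    have hb := PySem.Int.floordiv_two_mid_bounds (le_of_lt hlt)
    have h2 := (PySem.Int.le_floordiv_iff_mul_le (a := lo + hi) (b := 2)
      (q := PySem.Int.floordiv (lo + hi) 2) (by omega)).mp (le_refl _)
    set mid := PySem.Int.floordiv (lo + hi) 2 with hm
    have hmlt : mid < hi := by omega
    have hmget : PySem.List.pyGetD ov mid 0 = ov[mid.toNat] :=
      PySem.List.pyGetD_eq_getElem ov 0 (by omega) (by omega)
    by_cases hge : p ≤ PySem.List.pyGetD ov mid 0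
    · have hmth : mid < (thN p ov : Int) := by
        by_contra hc
        have := thN_ge_imp p ov hni mid.toNat (by omega) (by omega)
        rw [hmget] at hge; omega
      rw [if_pos hge]
      exact ih (hi - (mid + 1)).toNat (by omega) (mid + 1) hi rfl (by omega) (by omega) hhi hlen
    · have hmth : (thN p ov : Int) ≤ mid := by
        by_contra hc
        have := thN_lt_imp p ov mid.toNat (by omega) (by omega)
        rw [hmget] at hge; omega
      rw [if_neg hge]
      exact ih (mid - lo).toNat (by omega) lo mid rfl h0 hlo hmth (by omega)
  · rw [dif_neg hlt]; omega

-- pvBS never returns below its (non-negative) lower bound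
theorem bs_nonneg (ov : List Int) (p : Int) :
    ∀ (lo hi : Int), 0 ≤ lo → 0 ≤ pvBS ov p lo hi := by
  intro lo hi
  induction hgas : (hi - lo).toNat using Nat.strong_induction_on generalizing lo hi with
  | _ n ih =>
  intro h0
  subst hgas
  rw [pvBS]
  by_cases hlt : lo < hi
  · rw [dif_pos hlt]
    have hb := PySem.Int.floordiv_two_mid_bounds (le_of_lt hlt)
    have h2 := (PySem.Int.le_floordiv_iff_mul_le (a := lo + hi) (b := 2)
      (q := PySem.Int.floordiv (lo + hi) 2) (by omega)).mp (le_refl _)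
    set mid := PySem.Int.floordiv (lo + hi) 2 with hm
    by_cases hge : p ≤ PySem.List.pyGetD ov mid 0
    · rw [if_pos hge]
      exact ih (hi - (mid + 1)).toNat (by omega) (mid + 1) hi rfl (by omega)
    · rw [if_neg hge]
      exact ih (mid - lo).toNat (by omega) lo mid rfl h0
  · rw [dif_neg hlt]; exact h0

-- main loop equivalence on the non-increasing prefix of length ≥ every depth reached
theorem loop_eq (pm tail : List Int) (hni : NonInc pm) :
    ∀ (pz : List Int) (d : Int), d ≤ (pm.length : Int) →
      pvLoopA (pm ++ tail) pz d = pvLoopB pm pz d := by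
  intro pz
  induction pz with
  | nil => intro d _; simp [pvLoopA, pvLoopB]
  | cons p ps ih =>
    intro d hd
    have hth := thN_le_length p pm
    have hbs : pvBS pm p 0 pm.length = (thN p pm : Int) :=
      bs_eq_thN pm p hni 0 pm.length (le_refl 0) (by positivity) (by exact_mod_cast hth) (le_refl _)
    have hw := whileA_eq_min pm tail p hni d hd
    simp only [pvLoopA, pvLoopB, hbs, hw]
    by_cases hz : min d (thN p pm : Int) = 0
    · rw [if_pos hz, if_pos hz]
    · rw [if_neg hz, if_neg hz]
      exact ih (min d (thN p pm : Int) - 1) (by omega)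

-- depths ≤ 0: neither loop ever reads the oven, both just count down (or return 0)
theorem loop_eq_nonpos (ovA ovB : List Int) :
    ∀ (pz : List Int) (d : Int), d ≤ 0 → pvLoopA ovA pz d = pvLoopB ovB pz d := by
  intro pz
  induction pz with
  | nil => intro d _; simp [pvLoopA, pvLoopB]
  | cons p ps ih =>
    intro d hd
    have hbs : 0 ≤ pvBS ovB p 0 ovB.length := bs_nonneg ovB p 0 ovB.length (le_refl 0)
    have hw : pvWhileA ovA p d = d := by rw [pvWhileA, if_neg (by omega)]
    have hmin : min d (pvBS ovB p 0 ovB.length) = d := by omega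
    simp only [pvLoopA, pvLoopB, hw, hmin]
    by_cases hz : d = 0
    · rw [if_pos hz, if_pos hz]
    · rw [if_neg hz, if_neg hz]; exact ih (d - 1) (by omega)

-- A's index loop turns (l1 ++ [m]) ++ l2 into prefix minima continued from m
theorem foldA_eq (l2 : List Int) :
    ∀ (l1 : List Int) (m : Int) (e : Int), e ≤ (l1.length : Int) + 1 + l2.length →
      (PySem.List.pyRange ((l1.length : Int) + 1) e 1).foldl pvStepA ((l1 ++ [m]) ++ l2)
        = (l1 ++ [m]) ++ pmAux m (l2.take (e - ((l1.length : Int) + 1)).toNat)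
            ++ l2.drop (e - ((l1.length : Int) + 1)).toNat := by
  induction l2 with
  | nil =>
    intro l1 m e he
    simp at he
    rw [PySem.List.pyRange_one_eq_nil (by push_cast; omega)]
    simp [pmAux]
  | cons x l2' ih =>
    intro l1 m e he
    by_cases hse : e ≤ (l1.length : Int) + 1
    · rw [PySem.List.pyRange_one_eq_nil hse]
      have h0 : (e - ((l1.length : Int) + 1)).toNat = 0 := by omega
      simp [h0, pmAux]
    · rw [PySem.List.pyRange_one_cons (by omega)]
      simp only [List.foldl_cons]
      have hstep : pvStepA ((l1 ++ [m]) ++ x :: l2') ((l1.length : Int) + 1)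
          = ((l1 ++ [m]) ++ [min m x]) ++ l2' := by
        unfold pvStepA
        have hg1 : PySem.List.pyGet? ((l1 ++ [m]) ++ x :: l2') ((l1.length : Int) + 1) = some x := by
          have hl : ((l1 ++ [m]).length : Int) = (l1.length : Int) + 1 := by simp
          rw [← hl]
          exact PySem.List.pyGet?_append_length (l1 ++ [m]) l2' x
        have hg2 : PySem.List.pyGet? ((l1 ++ [m]) ++ x :: l2') ((l1.length : Int) + 1 - 1) = some m := by
          have hl1 : (l1 ++ [m]) ++ x :: l2' = l1 ++ m :: (x :: l2') := by simp
          have hl2 : (l1.length : Int) + 1 - 1 = (l1.length : Int) := by omega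
          rw [hl1, hl2]
          exact PySem.List.pyGet?_append_length l1 (x :: l2') m
        rw [hg1, hg2]
        show ((l1 ++ [m]) ++ x :: l2').set ((l1.length : Int) + 1).toNat (min x m) = _
        have htn : ((l1.length : Int) + 1).toNat = (l1 ++ [m]).length := by
          simp
        rw [htn, List.set_append_right _ _ (le_refl _)]
        simp [min_comm]
      rw [hstep]
      have harr : (l1.length : Int) + 1 + 1 = ((l1 ++ [m]).length : Int) + 1 := by simp
      rw [harr, ih (l1 ++ [m]) (min m x) e (by simp at he ⊢; omega)]
      have ht : (e - ((l1.length : Int) + 1)).toNat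
          = (e - (((l1 ++ [m]).length : Int) + 1)).toNat + 1 := by simp; omega
      rw [ht]
      simp [pmAux, List.append_assoc]

-- B's append loop builds prefix minima continued from the accumulator's last element
theorem buildB_eq (xs : List Int) :
    ∀ (l1 : List Int) (m : Int), xs.foldl pvBuildB (l1 ++ [m]) = (l1 ++ [m]) ++ pmAux m xs := by
  induction xs with
  | nil => intro l1 m; simp [pmAux]
  | cons x xs ih =>
    intro l1 m
    have hstep : pvBuildB (l1 ++ [m]) x = (l1 ++ [m]) ++ [min m x] := by
      unfold pvBuildB
      rw [List.getLast?_concat]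
      have h : (if x < m then x else m) = min m x := by omega
      simp [h]
    rw [List.foldl_cons, hstep]
    have := ih (l1 ++ [m]) (min m x)
    simp only [List.append_assoc] at this ⊢
    rw [this]
    simp [pmAux]

theorem solve_eq_of_main (D N : Int) (oven pz : List Int) (h1 : 1 ≤ D) (h2 : D ≤ (oven.length : Int)) :
    solve D N oven pz = solve_alt D N oven pz := by
  match oven with
  | [] => simp at h2; omega
  | x :: rest =>
    have hrl : D ≤ 1 + (rest.length : Int) := by
      rw [List.length_cons] at h2; push_cast at h2; omega
    unfold solve solve_alt
    -- A's mutated oven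
    have hfoldA := foldA_eq rest [] x D (by simp; omega)
    simp only [List.length_nil, Nat.cast_zero, zero_add, List.nil_append,
      List.singleton_append] at hfoldA
    -- B's built oven
    have hslice : PySem.List.slice (x :: rest) none (some D) = (x :: rest).take D.toNat :=
      PySem.List.slice_to (x :: rest) (by omega)
    have htake : (x :: rest).take D.toNat = x :: rest.take ((D - 1)).toNat := by
      have h : D.toNat = (D - 1).toNat + 1 := by omega
      rw [h]; rfl
    have hbuild : ((x :: rest.take (D - 1).toNat).foldl pvBuildB []) =
        x :: pmAux x (rest.take (D - 1).toNat) := by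
      have h0 : pvBuildB [] x = ([] : List Int) ++ [x] := by unfold pvBuildB; simp
      rw [List.foldl_cons, h0, buildB_eq]
      simp
    rw [hslice, htake, hbuild, hfoldA]
    -- the common non-increasing prefix
    have hni : NonInc (x :: pmAux x (rest.take (D - 1).toNat)) := nonInc_pmAux _ _
    have hlen : ((x :: pmAux x (rest.take (D - 1).toNat)).length : Int) = D := by
      simp [pmAux_length]
      omega
    have := loop_eq (x :: pmAux x (rest.take (D - 1).toNat)) (rest.drop (D - 1).toNat) hni pz D
      (by omega)
    simpa using this

-- ===== VERDICT (by name: the statement is the Claim_ definition above) =====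
theorem solve_spec : Claim_equal_solve := by
  intro D N oven pz _hdom hpre
  unfold Spec_solve
  by_cases hD : D ≤ 0
  · unfold solve solve_alt
    exact loop_eq_nonpos _ _ pz D hD
  · by_cases hlen : D ≤ (oven.length : Int)
    · exact solve_eq_of_main D N oven pz (by omega) hlen
    · rcases hpre with h | h | ⟨h1, h2⟩
      · omega
      · omega
      · subst h1; subst h2
        unfold solve solve_alt
        simp [pvLoopA, pvLoopB]
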